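-- pv_equiv track=rewrite | github.com/20jastrobel/Trying_Again | pydephasing/quantum/export_hubbard_jw_reference.py | line_lattice_periodic_edges
-- ===== SOURCE A (Python) =====
-- from typing import Dict, List, Tuple
--
-- def line_lattice_periodic_edges(length: int) -> List[Tuple[int, int]]:
--     """
--     Undirected nearest-neighbor edges for a 1D periodic line lattice.
--     This matches LineLattice(..., boundary_condition=PERIODIC) bond connectivity
--     while deduplicating reverse directions.
--     """
--     if length <= 1:
--         return []
--
--     edges = set()
--     for i in range(length):
--         j = (i + 1) % length
--         if i == j:
--             continue
--         a, b = (i, j) if i < j else (j, i)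
--         edges.add((a, b))
--     return sorted(edges)
-- ===== SOURCE B (Python) =====
-- from typing import Dict, List, Tuple
--
-- def line_lattice_periodic_edges(length: int) -> List[Tuple[int, int]]:
--     """Sorted edge list of the periodic 1D line lattice, built directly in
--     sorted order in one pass (no set, no sort)."""
--     if length <= 1:
--         return []
--     if length == 2:
--         return [(0, 1)]
--     return [(0, 1), (0, length - 1)] + [(i, i + 1) for i in range(1, length - 1)]
-- ===== Notes on version B (the rewrite author's own statement) =====
-- stated objective: faster
-- what changed: B emits the edge list already in sorted order in one pass ([(0,1),(0,n-1)] followed by the consecutive pairs (i,i+1)), eliminating A's set construction and final sort.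
import Mathlib
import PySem

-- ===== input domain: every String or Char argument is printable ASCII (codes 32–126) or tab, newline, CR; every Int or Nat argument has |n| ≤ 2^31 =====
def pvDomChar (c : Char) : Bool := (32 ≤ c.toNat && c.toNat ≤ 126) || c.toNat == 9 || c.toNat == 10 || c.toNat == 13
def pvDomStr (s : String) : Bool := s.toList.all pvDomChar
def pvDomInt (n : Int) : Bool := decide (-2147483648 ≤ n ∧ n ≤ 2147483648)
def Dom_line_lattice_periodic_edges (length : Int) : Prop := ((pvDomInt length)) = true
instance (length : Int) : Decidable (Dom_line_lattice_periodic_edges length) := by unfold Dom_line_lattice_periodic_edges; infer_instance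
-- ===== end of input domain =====

-- B builds the sorted edge list directly in one pass (O(n)) instead of A's set + sort (O(n log n)).

-- ===== PORT A =====
def line_lattice_periodic_edges (length : Int) : List (Int × Int) :=
  if length ≤ 1 then []
  else
    let edges : PySem.Set (Int × Int) :=
      (PySem.List.pyRange 0 length 1).foldl (fun edges i =>
        let j := PySem.Int.mod (i + 1) length
        if i = j then edges
        else
          let p := if i < j then (i, j) else (j, i)
          PySem.Set.add edges p) PySem.Set.empty
    PySem.List.sorted2 edges (fun p => p.1) (fun p => p.2) false

-- ===== PORT B =====
def line_lattice_periodic_edges_alt (length : Int) : List (Int × Int) :=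
  if length ≤ 1 then []
  else if length = 2 then [(0, 1)]
  else [(0, 1), (0, length - 1)] ++ (PySem.List.pyRange 1 (length - 1) 1).map (fun i => (i, i + 1))

-- ===== PRECONDITION & SPEC =====
def Spec_line_lattice_periodic_edges (length : Int) (out : List (Int × Int)) : Prop := out = line_lattice_periodic_edges_alt length
instance (length : Int) (out : List (Int × Int)) : Decidable (Spec_line_lattice_periodic_edges length out) := by unfold Spec_line_lattice_periodic_edges; infer_instance

-- ===== CLAIM (what is proved, stated in full; the proofs are below) =====
def Claim_equal_line_lattice_periodic_edges : Prop := ∀ (length : Int), Dom_line_lattice_periodic_edges length → Spec_line_lattice_periodic_edges length (line_lattice_periodic_edges length)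

-- ===== LEMMAS AND PROOFS =====

-- Python's tuple comparison in sorted2 is exactly the lexicographic order on Int × Int.
theorem sorted2_eq_sorted_lex (xs : List (Int × Int)) :
    PySem.List.sorted2 xs (fun p => p.1) (fun p => p.2) false
      = PySem.List.sorted xs (fun p => toLex p) false := by
  unfold PySem.List.sorted2 PySem.List.sorted
  have h : (fun (a b : Int × Int) => decide (a.1 < b.1) || (!decide (b.1 < a.1) && decide (a.2 < b.2)))
      = fun (a b : Int × Int) => decide (toLex a < toLex b) := by
    funext a b
    have hiff : (a.1 < b.1 ∨ (¬ b.1 < a.1 ∧ a.2 < b.2)) ↔ (toLex a < toLex b) := by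
      rw [Prod.Lex.lt_iff]; simp only [ofLex_toLex]; omega
    simp only [← decide_not, ← Bool.decide_and, ← Bool.decide_or, decide_eq_decide]
    exact hiff
  simp only [if_neg (by decide : ¬ (false = true))]
  rw [h]

-- Folding Set.add of fresh, pairwise-distinct elements just appends them.
theorem foldl_set_add_map (f : Int → Int × Int) :
    ∀ (l : List Int) (s : List (Int × Int)), (∀ x ∈ l, f x ∉ s) → (l.map f).Nodup →
    l.foldl (fun s x => PySem.Set.add s (f x)) s = s ++ l.map f := by
  intro l
  induction l with
  | nil => intro s _ _; simp
  | cons x xs ih =>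
    intro s hfresh hnd
    have hx : f x ∉ s := hfresh x (by simp)
    have hstep : PySem.Set.add s (f x) = s ++ [f x] := by
      unfold PySem.Set.add PySem.Set.contains
      rw [if_neg]
      simpa using hx
    have hnd' := hnd
    simp only [List.map_cons, List.nodup_cons, List.mem_map] at hnd'
    simp only [List.foldl_cons, hstep]
    rw [ih (s ++ [f x])]
    · simp
    · intro y hy
      simp only [List.mem_append, List.mem_singleton]
      rintro (hys | heq)
      · exact hfresh y (by simp [hy]) hys
      · exact hnd'.1 ⟨y, hy, heq⟩
    · exact hnd'.2

theorem line_lattice_periodic_edges_spec : Claim_equal_line_lattice_periodic_edges := by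
  intro n _
  unfold Spec_line_lattice_periodic_edges line_lattice_periodic_edges line_lattice_periodic_edges_alt
  by_cases h1 : n ≤ 1
  · simp [h1]
  · by_cases h2 : n = 2
    · subst h2; decide
    · have h3 : 3 ≤ n := by omega
      rw [if_neg h1, if_neg h1, if_neg h2]
      -- characterise the loop: it builds the consecutive pairs then (0, n-1)
      have hsplit := PySem.List.pyRange_one_append 0 (n - 1) n (by omega) (by omega)
      have hlast : PySem.List.pyRange (n - 1) n 1 = [n - 1] := by
        have := PySem.List.pyRange_one_singleton (n - 1)
        simpa [show n - 1 + 1 = n by omega] using this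
      rw [hsplit, hlast, List.foldl_append]
      -- the first n-1 iterations each add (i, i+1)
      have hbody : List.foldl (fun edges i =>
            let j := PySem.Int.mod (i + 1) n
            if i = j then edges
            else
              let p := if i < j then (i, j) else (j, i)
              PySem.Set.add edges p) PySem.Set.empty (PySem.List.pyRange 0 (n - 1) 1)
          = (PySem.List.pyRange 0 (n - 1) 1).map (fun i => (i, i + 1)) := by
        rw [PySem.List.foldl_congr_mem _ _ (fun s i => PySem.Set.add s (i, i + 1)) _ ?_]
        · have := foldl_set_add_map (fun i => (i, i + 1)) (PySem.List.pyRange 0 (n - 1) 1) [] (by simp) ?_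
          · simpa [PySem.Set.empty] using this
          · refine List.Nodup.map ?_ (PySem.List.nodup_pyRange_one 0 (n - 1))
            intro a b hab
            simpa using congrArg Prod.fst hab
        · intro acc i hi
          rw [PySem.List.mem_pyRange_one] at hi
          have hj : PySem.Int.mod (i + 1) n = i + 1 := by
            rw [PySem.Int.mod_eq_emod_of_pos (by omega)]
            exact Int.emod_eq_of_lt (by omega) (by omega)
          simp only [hj]
          rw [if_neg (by omega), if_pos (by omega)]
      rw [hbody]
      -- the last iteration adds (0, n-1)
      have hjlast : PySem.Int.mod (n - 1 + 1) n = 0 := by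
        rw [PySem.Int.mod_eq_emod_of_pos (by omega)]
        simp [show n - 1 + 1 = n by omega]
      simp only [List.foldl_cons, List.foldl_nil, hjlast]
      rw [if_neg (by omega), if_neg (by omega)]
      have hnotmem : ((0 : Int), n - 1) ∉ (PySem.List.pyRange 0 (n - 1) 1).map (fun i => (i, i + 1)) := by
        intro hmem
        rcases List.mem_map.mp hmem with ⟨i, hi, heq⟩
        rw [PySem.List.mem_pyRange_one] at hi
        have h1' := congrArg Prod.fst heq
        have h2' := congrArg Prod.snd heq
        simp at h1' h2'
        omega
      have haddlast : PySem.Set.add ((PySem.List.pyRange 0 (n - 1) 1).map (fun i => (i, i + 1))) (0, n - 1)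
          = (PySem.List.pyRange 0 (n - 1) 1).map (fun i => (i, i + 1)) ++ [(0, n - 1)] := by
        unfold PySem.Set.add PySem.Set.contains
        rw [if_neg]
        simpa using hnotmem
      rw [haddlast, sorted2_eq_sorted_lex]
      -- name the sorted result
      have hcons : PySem.List.pyRange 0 (n - 1) 1 = 0 :: PySem.List.pyRange 1 (n - 1) 1 :=
        PySem.List.pyRange_one_cons (by omega : (0:Int) < n - 1)
      apply PySem.List.sorted_eq_of_perm_of_pairwise_lt
      · -- permutation
        rw [hcons]
        simp only [List.map_cons, List.cons_append, List.nil_append, zero_add]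
        exact List.Perm.cons _ ((List.perm_append_singleton _ _).symm)
      · -- strictly increasing lexicographically
        have hlex : ∀ (a b : Int × Int), (a.1 < b.1 ∨ (a.1 = b.1 ∧ a.2 < b.2)) → toLex a < toLex b := by
          intro a b h
          rw [Prod.Lex.lt_iff]
          simpa using h
        simp only [List.cons_append, List.nil_append, List.pairwise_cons]
        refine ⟨?_, ?_, ?_⟩
        · intro p hp
          simp only [List.mem_cons, List.mem_map] at hp
          rcases hp with rfl | ⟨i, hi, rfl⟩
          · exact hlex _ _ (by simp; omega)
          · rw [PySem.List.mem_pyRange_one] at hi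
            exact hlex _ _ (by simp; omega)
        · intro p hp
          rcases List.mem_map.mp hp with ⟨i, hi, rfl⟩
          rw [PySem.List.mem_pyRange_one] at hi
          exact hlex _ _ (by simp; omega)
        · rw [List.pairwise_map]
          refine List.Pairwise.imp ?_ (PySem.List.pairwise_lt_pyRange_one 1 (n - 1))
          intro a b hab
          exact hlex _ _ (by simp; omega)

-- ===== VERDICT (by name: the statement is the Claim_ definition above) =====
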